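-- pv_equiv track=rewrite | github.com/laurelhiatt/inSTRbility | inSTRbility/operation_utils.py | complement_cigar
-- ===== SOURCE A (Python) =====
-- def remove_softclips(cigar):
--     """
--     Removes the softclips from the CIGAR string
--
--     Args:
--         cigar(str): CIGAR string
--
--     Returns:
--         CIGAR string without softclips
--     """
--
--     new_cigar = ''
--     length = ''
--     for c in cigar:
--         if c.isdigit(): length += c
--         else:
--             if c != 'S': new_cigar += f'{length}{c}'
--             length = ''
--     return new_cigar
--
-- def complement_cigar(cigar):
--     """
--     Reverses the CIGAR string
--     Args:
--         cigar: CIGAR string from pysam record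
--
--     Returns:
--         list of tuples
--     """
--     new_cigar = ''
--     cigar = remove_softclips(cigar)
--     for c in cigar:
--         if c == 'I': c = 'D'
--         elif c == 'D': c = 'I'
--         new_cigar += c
--     return new_cigar
-- ===== SOURCE B (Python) =====
-- import re
--
-- def complement_cigar(cigar):
--     trans = {'I': 'D', 'D': 'I'}
--     return ''.join(n + trans.get(op, op)
--                    for n, op in re.findall(r'(\d*)(\D)', cigar)
--                    if op != 'S')
-- ===== Notes on version B (the rewrite author's own statement) =====
-- stated objective: idiomatic
-- what changed: Replaces A's two char-by-char string-building passes (a digit-accumulator loop that rebuilds the string, then a second loop swapping I/D) with one regex tokenization into (digits, op) pairs and a single filtered join with a dict translation.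
import Mathlib
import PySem

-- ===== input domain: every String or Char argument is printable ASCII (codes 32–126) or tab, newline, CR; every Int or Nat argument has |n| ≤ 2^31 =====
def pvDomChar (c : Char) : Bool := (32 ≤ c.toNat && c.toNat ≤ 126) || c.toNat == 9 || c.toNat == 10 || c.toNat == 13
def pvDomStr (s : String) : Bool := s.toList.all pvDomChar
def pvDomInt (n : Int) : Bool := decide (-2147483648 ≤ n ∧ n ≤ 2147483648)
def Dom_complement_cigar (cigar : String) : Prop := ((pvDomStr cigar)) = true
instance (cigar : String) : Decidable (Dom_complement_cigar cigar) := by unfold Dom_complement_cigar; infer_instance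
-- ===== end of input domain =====

-- B replaces A's two char-by-char string-building passes (digit accumulator, then a second
-- swap pass) by one regex tokenization into (digits, op) pairs and a single filtered join
-- (more idiomatic; same behaviour on the ASCII domain, where str.isdigit and \d agree).

-- ===== PORT A =====
-- one step of remove_softclips' loop: state = (new_cigar, length), as lists of chars
def stepA (acc : List Char × List Char) (c : Char) : List Char × List Char :=
  if c.isDigit then (acc.1, acc.2 ++ [c])
  else if c ≠ 'S' then (acc.1 ++ acc.2 ++ [c], []) else (acc.1, [])

def removeSoftclips (cigar : String) : String :=
  String.ofList (cigar.toList.foldl stepA ([], [])).1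

def complement_cigar (cigar : String) : String :=
  let cigar2 := removeSoftclips cigar
  String.ofList (cigar2.toList.foldl
    (fun acc c =>
      let c' := if c = 'I' then 'D' else if c = 'D' then 'I' else c
      acc ++ [c']) [])

-- ===== PORT B =====
-- Hand port of re.findall(r'(\d*)(\D)', cigar): at each position the regex greedily takes a
-- digit run, then needs one non-digit char; trailing digits never complete a match.  Exact on
-- the ASCII domain, where Python's str.isdigit and \d both mean '0'..'9' (= Char.isDigit).
def pyFindallNumOp (cs : List Char) : List (List Char × Char) :=
  match _h : cs.dropWhile Char.isDigit with
  | [] => []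
  | c :: rest => (cs.takeWhile Char.isDigit, c) :: pyFindallNumOp rest
termination_by cs.length
decreasing_by
  have := List.length_dropWhile_le (p := Char.isDigit) (l := cs)
  simp [_h] at this; omega

-- {'I': 'D', 'D': 'I'}.get(op, op)
def transOp (c : Char) : Char :=
  PySem.Dict.getD (PySem.Dict.insert (PySem.Dict.insert PySem.Dict.empty 'I' 'D') 'D' 'I') c c

def complement_cigar_alt (cigar : String) : String :=
  String.ofList
    (((pyFindallNumOp cigar.toList).filter (fun p => p.2 != 'S')).flatMap
      (fun p => p.1 ++ [transOp p.2]))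

-- ===== PRECONDITION & SPEC =====
def Spec_complement_cigar (cigar : String) (out : String) : Prop := out = complement_cigar_alt cigar
instance (cigar : String) (out : String) : Decidable (Spec_complement_cigar cigar out) := by unfold Spec_complement_cigar; infer_instance

-- ===== CLAIM (what is proved, stated in full; the proofs are below) =====
def Claim_equal_complement_cigar : Prop := ∀ (cigar : String), Dom_complement_cigar cigar → Spec_complement_cigar cigar (complement_cigar cigar)

-- ===== LEMMAS AND PROOFS =====

-- unfolding equations for pyFindallNumOp
theorem pf_nil (cs : List Char) (h : cs.dropWhile Char.isDigit = []) : pyFindallNumOp cs = [] := by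
  rw [pyFindallNumOp]; split
  · rfl
  · simp_all

theorem pf_cons (cs : List Char) (c : Char) (rest : List Char)
    (h : cs.dropWhile Char.isDigit = c :: rest) :
    pyFindallNumOp cs = (cs.takeWhile Char.isDigit, c) :: pyFindallNumOp rest := by
  rw [pyFindallNumOp]; split
  · simp_all
  · rename_i c' rest' h'
    rw [h] at h'; cases h'; rfl

-- A's swap as a function on one char
def swapA (c : Char) : Char := if c = 'I' then 'D' else if c = 'D' then 'I' else c

theorem transOp_eq_swapA (c : Char) : transOp c = swapA c := by
  by_cases h1 : c = 'I'
  · subst h1; decide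
  · by_cases h2 : c = 'D'
    · subst h2; decide
    · have b1 : ('I' == c) = false := by simpa [beq_iff_eq] using fun h => h1 h.symm
      have b2 : ('D' == c) = false := by simpa [beq_iff_eq] using fun h => h2 h.symm
      simp [transOp, swapA, h1, h2, PySem.Dict.getD, PySem.Dict.get?, PySem.Dict.insert,
        PySem.Dict.empty, PySem.Dict.contains, List.find?, b1, b2]

theorem swapA_digit {c : Char} (h : c.isDigit) : swapA c = c := by
  have h1 : c ≠ 'I' := by rintro rfl; simp [Char.isDigit] at h
  have h2 : c ≠ 'D' := by rintro rfl; simp [Char.isDigit] at h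
  simp [swapA, h1, h2]

-- recursive characterisation of remove_softclips' loop
def rsCore : List Char → List Char → List Char
  | [], _ => []
  | c :: cs, len =>
    if c.isDigit then rsCore cs (len ++ [c])
    else (if c ≠ 'S' then len ++ [c] else []) ++ rsCore cs []

theorem rs_foldl (cs : List Char) (acc len : List Char) :
    (cs.foldl stepA (acc, len)).1 = acc ++ rsCore cs len := by
  induction cs generalizing acc len with
  | nil => simp [rsCore]
  | cons c cs ih =>
    by_cases hd : c.isDigit
    · simpa [stepA, hd, rsCore] using ih acc (len ++ [c])
    · by_cases hs : c = 'S'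
      · simpa [stepA, hd, hs, rsCore] using ih acc []
      · rw [List.foldl_cons]
        simp only [stepA, hd, Bool.false_eq_true, if_false, ne_eq, hs, not_false_iff,
          if_true]
        rw [ih]
        simp [rsCore, hd, hs, List.append_assoc]

-- accumulator form of the tokenizer
def tokAux : List Char → List Char → List (List Char × Char)
  | [], _ => []
  | c :: cs, len =>
    if c.isDigit then tokAux cs (len ++ [c])
    else (len, c) :: tokAux cs []

def mapFirst (len : List Char) : List (List Char × Char) → List (List Char × Char)
  | [] => []
  | (n, c) :: t => (len ++ n, c) :: t

theorem mapFirst_nil (l : List (List Char × Char)) : mapFirst [] l = l := by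
  cases l with
  | nil => rfl
  | cons p t => cases p; simp [mapFirst]

theorem tokAux_eq (cs : List Char) (len : List Char) :
    tokAux cs len = mapFirst len (pyFindallNumOp cs) := by
  induction cs generalizing len with
  | nil => rw [pf_nil [] (by simp)]; simp [tokAux, mapFirst]
  | cons c cs ih =>
    by_cases hd : c.isDigit
    · rw [tokAux, if_pos hd, ih]
      cases h : cs.dropWhile Char.isDigit with
      | nil =>
        have h1 : (c :: cs).dropWhile Char.isDigit = [] := by simp [hd, h]
        rw [pf_nil cs h, pf_nil _ h1]; simp [mapFirst]
      | cons d rest =>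
        have h1 : (c :: cs).dropWhile Char.isDigit = d :: rest := by simp [hd, h]
        rw [pf_cons cs d rest h, pf_cons _ d rest h1]
        simp [mapFirst, hd]
    · have h1 : (c :: cs).dropWhile Char.isDigit = c :: cs := by simp [hd]
      rw [tokAux, if_neg hd, ih, mapFirst_nil, pf_cons (c :: cs) c cs h1]
      have h2 : (c :: cs).takeWhile Char.isDigit = [] := by simp [hd]
      rw [h2]; simp [mapFirst]

-- remove_softclips' output in terms of the tokens
theorem rsCore_eq_tokAux (cs : List Char) (len : List Char) :
    rsCore cs len =
      (tokAux cs len).flatMap (fun p => if p.2 ≠ 'S' then p.1 ++ [p.2] else []) := by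
  induction cs generalizing len with
  | nil => simp [rsCore, tokAux]
  | cons c cs ih =>
    by_cases hd : c.isDigit
    · simp [rsCore, tokAux, hd, ih]
    · by_cases hs : c = 'S' <;> simp [rsCore, tokAux, hd, hs, ih]

-- all first components of the tokens are digit chars
theorem pyFindallNumOp_digits (cs : List Char) :
    ∀ p ∈ pyFindallNumOp cs, ∀ x ∈ p.1, x.isDigit := by
  induction cs using pyFindallNumOp.induct with
  | case1 cs h => simp [pf_nil cs h]
  | case2 cs c rest h ih =>
    intro p hp
    rw [pf_cons cs c rest h] at hp
    rcases List.mem_cons.mp hp with rfl | hmem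
    · intro x hx; exact List.mem_takeWhile_imp hx
    · exact ih p hmem

-- A's second loop is map swapA
theorem foldl_swap (cs : List Char) (acc : List Char) :
    cs.foldl (fun acc c =>
      let c' := if c = 'I' then 'D' else if c = 'D' then 'I' else c
      acc ++ [c']) acc = acc ++ cs.map swapA := by
  induction cs generalizing acc with
  | nil => simp
  | cons c cs ih => simp [ih, swapA]

-- swapping after joining = joining the translated tokens, given digit-only lengths
theorem flat_eq (toks : List (List Char × Char)) (hdig : ∀ p ∈ toks, ∀ x ∈ p.1, x.isDigit) :
    (toks.flatMap (fun p => if p.2 ≠ 'S' then p.1 ++ [p.2] else [])).map swapA =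
      (toks.filter (fun p => p.2 != 'S')).flatMap (fun p => p.1 ++ [transOp p.2]) := by
  induction toks with
  | nil => simp
  | cons p t ih =>
    obtain ⟨n, c⟩ := p
    have hn : ∀ x ∈ n, x.isDigit := fun x hx => hdig (n, c) (by simp) x hx
    have ht : ∀ q ∈ t, ∀ x ∈ q.1, x.isDigit := fun q hq => hdig q (List.mem_cons_of_mem _ hq)
    have hmap : n.map swapA = n := by
      rw [List.map_congr_left (fun x hx => swapA_digit (hn x hx))]; simp
    have ih' := ih ht
    by_cases hs : c = 'S'
    · simp [hs]; simpa using ih'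
    · simp [hs, transOp_eq_swapA, hmap]; simpa [transOp_eq_swapA] using ih'

-- ===== VERDICT (by name: the statement is the Claim_ definition above) =====
theorem complement_cigar_spec : Claim_equal_complement_cigar := by
  intro cigar _
  show complement_cigar cigar = complement_cigar_alt cigar
  unfold complement_cigar complement_cigar_alt removeSoftclips
  simp only [String.toList_ofList, rs_foldl, List.nil_append, foldl_swap]
  rw [rsCore_eq_tokAux, tokAux_eq, mapFirst_nil, flat_eq _ (pyFindallNumOp_digits cigar.toList)]
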